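-- pv_equiv track=rewrite | github.com/helloips/generation-py | advanced/src/lesson-04-03/step-14.py | get_sub_lists
-- ===== SOURCE A (Python) =====
-- def get_sub_lists(all_symbols):
--     all_sub_lists = list()
--     all_sub_lists.append([])
--
--     for size in range(1, len(all_symbols) + 1):
--         for start in range(len(all_symbols)):
--             current_sub_list = all_symbols[start:start+size]
--             if len(current_sub_list) == size:
--                 all_sub_lists.append(all_symbols[start:start+size])
--
--     return all_sub_lists
-- ===== SOURCE B (Python) =====
-- def get_sub_lists(all_symbols):
--     # Structural recursion: buckets(xs)[k-1] holds every window of size k,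
--     # built by prepending xs's own prefixes to the buckets of xs[1:].
--     def buckets(xs):
--         if not xs:
--             return []
--         rest = buckets(xs[1:])
--         out = []
--         for k in range(1, len(xs) + 1):
--             b = [xs[:k]]
--             if k - 1 < len(rest):
--                 b = b + rest[k - 1]
--             out.append(b)
--         return out
--     result = [[]]
--     for size_bucket in buckets(all_symbols):
--         result += size_bucket
--     return result
-- ===== Notes on version B (the rewrite author's own statement) =====
-- stated objective: alternative
-- what changed: A emits slices directly from a size-major double loop with a length filter; B recurses structurally on the list, building a length-indexed bucket table (each level prepends its own prefixes to the tail's buckets) and concatenates the buckets after the leading empty sublist.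
import Mathlib
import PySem

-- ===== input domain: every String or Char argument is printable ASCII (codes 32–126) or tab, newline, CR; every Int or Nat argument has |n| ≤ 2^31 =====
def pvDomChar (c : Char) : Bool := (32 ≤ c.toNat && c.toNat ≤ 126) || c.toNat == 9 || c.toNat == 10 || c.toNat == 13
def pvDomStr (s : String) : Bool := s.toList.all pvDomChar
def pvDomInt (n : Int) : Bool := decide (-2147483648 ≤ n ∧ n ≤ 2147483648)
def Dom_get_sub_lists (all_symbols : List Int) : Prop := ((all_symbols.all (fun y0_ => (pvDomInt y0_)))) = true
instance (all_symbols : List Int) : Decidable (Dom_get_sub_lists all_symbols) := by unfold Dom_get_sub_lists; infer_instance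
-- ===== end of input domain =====

-- B replaces A's slice-and-filter double loop by a structural recursion that builds a
-- length-indexed bucket table and concatenates it behind the leading empty sublist: a different decomposition (objective: alternative).

-- ===== PORT A =====
def get_sub_lists (all_symbols : List Int) : List (List Int) :=
  (PySem.List.pyRange 1 ((all_symbols.length : Int) + 1) 1).foldl
    (fun all_sub_lists size =>
      (PySem.List.pyRange 0 (all_symbols.length : Int) 1).foldl
        (fun all_sub_lists start =>
          let current_sub_list := PySem.List.slice all_symbols (some start) (some (start + size))
          if (current_sub_list.length : Int) = size then
            all_sub_lists ++ [PySem.List.slice all_symbols (some start) (some (start + size))]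
          else all_sub_lists)
        all_sub_lists)
    [[]]

-- ===== PORT B =====
-- buckets xs : buckets[k-1] holds every window of size k, starts ascending (Source B's `buckets`)
def gslBuckets (xs : List Int) : List (List (List Int)) :=
  match xs with
  | [] => []
  | x :: tail =>
    let rest := gslBuckets tail
    (PySem.List.pyRange 1 (((x :: tail).length : Int) + 1) 1).foldl
      (fun out k =>
        let b := [PySem.List.slice (x :: tail) none (some k)]
        let b := if k - 1 < (rest.length : Int) then b ++ PySem.List.pyGetD rest (k - 1) [] else b
        out ++ [b])
      []

def get_sub_lists_alt (all_symbols : List Int) : List (List Int) :=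
  (gslBuckets all_symbols).foldl (fun result size_bucket => result ++ size_bucket) [[]]

-- ===== PRECONDITION & SPEC =====
def Spec_get_sub_lists (all_symbols : List Int) (out : List (List Int)) : Prop := out = get_sub_lists_alt all_symbols
instance (all_symbols : List Int) (out : List (List Int)) : Decidable (Spec_get_sub_lists all_symbols out) := by unfold Spec_get_sub_lists; infer_instance

-- ===== CLAIM (what is proved, stated in full; the proofs are below) =====
def Claim_equal_get_sub_lists : Prop := ∀ (all_symbols : List Int), Dom_get_sub_lists all_symbols → Spec_get_sub_lists all_symbols (get_sub_lists all_symbols)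

-- ===== LEMMAS AND PROOFS =====

-- canonical description: the bucket of windows of length k0+1, starts ascending
def gslCol (xs : List Int) (k0 : Nat) : List (List Int) :=
  (List.range (xs.length - k0)).map (fun s => (xs.drop s).take (k0 + 1))

theorem gslBuckets_eq (xs : List Int) :
    gslBuckets xs = (List.range xs.length).map (gslCol xs) := by
  induction xs with
  | nil => simp [gslBuckets]
  | cons x t ih =>
    rw [gslBuckets, ih, PySem.List.foldl_append_singleton_eq_map, PySem.List.pyRange_one,
      List.map_map, List.nil_append]
    have hlen : (((x :: t).length : Int) + 1 - 1).toNat = t.length + 1 := by simp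
    rw [hlen]
    apply List.map_congr_left
    intro k0 hk0
    simp only [List.mem_range] at hk0
    simp only [Function.comp]
    have h1 : (1 : Int) + (k0 : Int) = ((k0 + 1 : Nat) : Int) := by push_cast; ring
    rw [h1, PySem.List.slice_to_natCast]
    have h2 : ((k0 + 1 : Nat) : Int) - 1 = ((k0 : Nat) : Int) := by push_cast; ring
    rw [h2, PySem.List.pyGetD_natCast]
    simp only [List.length_map, List.length_range]
    by_cases hc : k0 < t.length
    · rw [if_pos (by exact_mod_cast hc)]
      have hgetD : (List.map (gslCol t) (List.range t.length)).getD k0 [] = gslCol t k0 := by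
        rw [List.getD_eq_getElem _ _ (by simpa using hc)]
        simp
      rw [hgetD]
      unfold gslCol
      have h3 : (x :: t).length - k0 = (t.length - k0) + 1 := by
        simp [List.length_cons]; omega
      rw [h3, List.range_succ_eq_map, List.map_cons, List.map_map]
      simp [Function.comp, List.drop_succ_cons]
    · rw [if_neg (by exact_mod_cast hc)]
      have hk : k0 = t.length := by omega
      subst hk
      unfold gslCol
      simp

theorem gsl_inner_eq (xs : List Int) (size : Int) (h1 : 1 ≤ size) (h2 : size ≤ (xs.length : Int))
    (acc : List (List Int)) :
    (PySem.List.pyRange 0 (xs.length : Int) 1).foldl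
      (fun all_sub_lists start =>
        let current_sub_list := PySem.List.slice xs (some start) (some (start + size))
        if (current_sub_list.length : Int) = size then
          all_sub_lists ++ [PySem.List.slice xs (some start) (some (start + size))]
        else all_sub_lists)
      acc
    = acc ++ gslCol xs (size.toNat - 1) := by
  set n := xs.length with hn
  set m : Int := (n : Int) - size + 1 with hm
  have hsz : ((size.toNat : Int)) = size := Int.toNat_of_nonneg (by omega)
  have h0m : (0 : Int) ≤ m := by omega
  have hmn : m ≤ (n : Int) := by omega
  rw [PySem.List.pyRange_one_append 0 m (n : Int) h0m hmn, List.foldl_append]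
  -- length of a slice with 0 ≤ start
  have hslen : ∀ start : Int, 0 ≤ start → start < (n : Int) →
      ((PySem.List.slice xs (some start) (some (start + size))).length : Int)
        = min size ((n : Int) - start) := by
    intro start hs0 hsn
    rw [PySem.List.slice_toNat xs hs0 (by omega)]
    simp only [List.length_take, List.length_drop]
    omega
  -- first segment: condition always true
  -- second segment (outer fold): condition always false
  rw [PySem.List.foldl_congr_mem _ _ (fun (a : List (List Int)) (_ : Int) => a) _
      (by
        intro a start hs
        rw [PySem.List.mem_pyRange_one] at hs
        simp only []
        rw [if_neg]
        rw [hslen start (by omega) hs.2]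
        omega)]
  rw [List.foldl_fixed]
  -- first segment: condition always true
  rw [PySem.List.foldl_congr_mem _ _
      (fun all_sub_lists start => all_sub_lists ++ [PySem.List.slice xs (some start) (some (start + size))]) _
      (by
        intro a start hs
        rw [PySem.List.mem_pyRange_one] at hs
        simp only []
        rw [if_pos]
        rw [hslen start hs.1 (by omega)]
        omega)]
  rw [PySem.List.foldl_append_singleton_eq_map]
  congr 1
  -- the map equals gslCol
  have hmnat : m = ((n - size.toNat + 1 : Nat) : Int) := by push_cast; omega
  rw [hmnat, PySem.List.pyRange_zero_nat, List.map_map]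
  unfold gslCol
  have hrange : n - (size.toNat - 1) = n - size.toNat + 1 := by omega
  rw [hrange]
  apply List.map_congr_left
  intro s hs
  simp only [Function.comp]
  have : (s : Int) + size = ((s + size.toNat : Nat) : Int) := by push_cast; omega
  rw [this]
  have := PySem.List.slice_natCast_add xs s size.toNat
  push_cast at this ⊢
  rw [this]
  congr 1
  omega


theorem gsl_A_eq (xs : List Int) :
    get_sub_lists xs = [[]] ++ (List.range xs.length).flatMap (gslCol xs) := by
  unfold get_sub_lists
  rw [PySem.List.foldl_congr_mem _ _
      (fun acc size => acc ++ gslCol xs (size.toNat - 1)) _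
      (by
        intro a size hs
        rw [PySem.List.mem_pyRange_one] at hs
        exact gsl_inner_eq xs size hs.1 (by omega) a)]
  rw [PySem.List.foldl_append_eq_flatMap]
  congr 1
  rw [PySem.List.pyRange_one, List.flatMap_map]
  have h : ((xs.length : Int) + 1 - 1).toNat = xs.length := by omega
  rw [h]
  apply List.flatMap_congr
  intro k hk
  congr 1
  omega

theorem gsl_B_eq (xs : List Int) :
    get_sub_lists_alt xs = [[]] ++ (List.range xs.length).flatMap (gslCol xs) := by
  unfold get_sub_lists_alt
  rw [PySem.List.foldl_append_eq_flatMap (fun b => b), gslBuckets_eq, List.flatMap_map]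

-- ===== VERDICT (by name: the statement is the Claim_ definition above) =====
theorem get_sub_lists_spec : Claim_equal_get_sub_lists := by
  intro xs _
  unfold Spec_get_sub_lists
  rw [gsl_A_eq, gsl_B_eq]
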